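-- pv_equiv track=rewrite | github.com/JDWyatt71/Project97 | Project97/dashboard (has builds as well for windows)/WindowsBuild/dashboard/dash.py | upgrade_popularity_by_position
-- ===== SOURCE A (Python) =====
-- from collections import Counter
--
-- def upgrade_popularity_by_position(paths_dict):
--     position_counts = {}
--
--     for path in paths_dict.values():
--         for i, upgrade in enumerate(path):
--             if i not in position_counts:
--                 position_counts[i] = Counter()
--             position_counts[i][upgrade] += 1
--
--     return position_counts
-- ===== SOURCE B (Python) =====
-- from collections import Counter
--
-- def upgrade_popularity_by_position(paths_dict):
--     paths = list(paths_dict.values())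
--     maxlen = max((len(p) for p in paths), default=0)
--     return {i: Counter(p[i] for p in paths if i < len(p)) for i in range(maxlen)}
-- ===== Notes on version B (the rewrite author's own statement) =====
-- stated objective: alternative
-- what changed: Replaces A's row-wise streaming pass that increments nested Counters per element with a column-wise dict comprehension: compute the maximum path length once, then for each position build Counter(path[i] for path if i < len(path)).
import Mathlib
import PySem

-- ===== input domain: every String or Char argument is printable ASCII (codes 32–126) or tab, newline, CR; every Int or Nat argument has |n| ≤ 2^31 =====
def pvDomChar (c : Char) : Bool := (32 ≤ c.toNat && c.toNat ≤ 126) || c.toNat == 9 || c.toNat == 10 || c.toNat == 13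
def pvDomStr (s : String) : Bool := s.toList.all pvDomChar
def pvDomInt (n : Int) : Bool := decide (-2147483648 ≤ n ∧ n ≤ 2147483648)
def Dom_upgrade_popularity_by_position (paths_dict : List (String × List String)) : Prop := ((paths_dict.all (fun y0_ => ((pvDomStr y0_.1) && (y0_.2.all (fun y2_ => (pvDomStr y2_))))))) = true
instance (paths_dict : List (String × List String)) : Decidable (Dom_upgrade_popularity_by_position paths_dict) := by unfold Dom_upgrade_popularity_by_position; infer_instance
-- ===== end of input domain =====

-- B replaces A's row-wise streaming pass (incrementing nested Counters element by element)
-- with a column-wise dict comprehension over range(maxlen); the return values are proved equal.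

-- ===== PORT A =====
-- the body of A's inner loop: ensure position_counts[i] exists, then position_counts[i][upgrade] += 1
def pvStep (pc : PySem.Dict Int (PySem.Dict String Int)) (iu : Int × String) : PySem.Dict Int (PySem.Dict String Int) :=
  let pc := if pc.contains iu.1 then pc else pc.insert iu.1 PySem.Dict.empty
  pc.modify iu.1 PySem.Dict.empty (fun c => c.modify iu.2 0 (· + 1))

def upgrade_popularity_by_position (paths_dict : List (String × List String)) : List (Int × List (String × Int)) :=
  let position_counts : PySem.Dict Int (PySem.Dict String Int) :=
    paths_dict.foldl (fun pc kv => (PySem.List.enumerate kv.2 0).foldl pvStep pc) PySem.Dict.empty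
  position_counts.items.map (fun p => (p.1, p.2.items))

-- ===== PORT B =====
def upgrade_popularity_by_position_alt (paths_dict : List (String × List String)) : List (Int × List (String × Int)) :=
  let paths := paths_dict.map (·.2)
  let maxlen := PySem.List.maxD (paths.map (fun p => PySem.List.len p)) (fun x => x) 0
  (PySem.List.pyRange 0 maxlen 1).map (fun i =>
    (i, (PySem.Dict.counter ((paths.filter (fun p => decide (i < PySem.List.len p))).map
          -- p[i]: guarded by i < len(p) and 0 ≤ i (i ranges over range(maxlen)), so the default is never used
          (fun p => PySem.List.pyGetD p i ""))).items))

-- ===== PRECONDITION & SPEC =====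
def Spec_upgrade_popularity_by_position (paths_dict : List (String × List String)) (out : List (Int × List (String × Int))) : Prop := out = upgrade_popularity_by_position_alt paths_dict
instance (paths_dict : List (String × List String)) (out : List (Int × List (String × Int))) : Decidable (Spec_upgrade_popularity_by_position paths_dict out) := by unfold Spec_upgrade_popularity_by_position; infer_instance

-- ===== CLAIM (what is proved, stated in full; the proofs are below) =====
def Claim_equal_upgrade_popularity_by_position : Prop := ∀ (paths_dict : List (String × List String)), Dom_upgrade_popularity_by_position paths_dict → Spec_upgrade_popularity_by_position paths_dict (upgrade_popularity_by_position paths_dict)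

-- ===== LEMMAS AND PROOFS =====

-- the column of entries at position i (exactly as B collects it)
def pvCol (paths_dict : List (String × List String)) (i : Int) : List String :=
  ((paths_dict.map (·.2)).filter (fun p => decide (i < PySem.List.len p))).map (fun p => PySem.List.pyGetD p i "")

theorem pvStep_getD (pc : PySem.Dict Int (PySem.Dict String Int)) (iu : Int × String) (j : Int) :
    (pvStep pc iu).getD j PySem.Dict.empty =
      if j = iu.1 then (pc.getD iu.1 PySem.Dict.empty).modify iu.2 0 (· + 1)
      else pc.getD j PySem.Dict.empty := by
  unfold pvStep
  by_cases h : pc.contains iu.1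
  · simp [h, PySem.Dict.getD_modify]
  · simp only [h, Bool.false_eq_true, if_false]
    rw [PySem.Dict.getD_modify]
    split_ifs with hj
    · subst hj; rw [PySem.Dict.getD_insert_self, PySem.Dict.getD_of_not_contains pc _ (by simpa using h)]
    · rw [PySem.Dict.getD_insert_of_ne _ _ _ hj]

theorem pvStep_keys (pc : PySem.Dict Int (PySem.Dict String Int)) (iu : Int × String) :
    (pvStep pc iu).keys = PySem.Set.add pc.keys iu.1 := by
  unfold pvStep
  by_cases h : pc.contains iu.1
  · simp only [h, if_true]
    rw [PySem.Dict.keys_modify, PySem.Dict.keys_insert_of_contains _ _ h,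
      PySem.Set.add_of_mem (by rwa [← PySem.Dict.contains_iff_mem_keys])]
  · simp only [h, Bool.false_eq_true, if_false]
    rw [PySem.Dict.keys_modify, PySem.Dict.keys_insert_of_contains _ _ (PySem.Dict.contains_insert_self _ _ _),
      PySem.Dict.keys_insert_of_not_contains _ _ (by simpa using h),
      PySem.Set.add_of_not_mem (by rw [← PySem.Dict.contains_iff_mem_keys]; simpa using h)]

theorem pvInner_getD (path : List String) (s : Int) (pc : PySem.Dict Int (PySem.Dict String Int)) (j : Int) :
    ((PySem.List.enumerate path s).foldl pvStep pc).getD j PySem.Dict.empty =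
      if s ≤ j ∧ j < s + path.length then
        (pc.getD j PySem.Dict.empty).modify (PySem.List.pyGetD path (j - s) "") 0 (· + 1)
      else pc.getD j PySem.Dict.empty := by
  induction path generalizing s pc with
  | nil => simp [PySem.List.enumerate_nil]
  | cons x xs ih =>
    rw [PySem.List.enumerate_cons, List.foldl_cons, ih]
    by_cases hj : j = s
    · subst hj
      have h1 : ¬ (j + 1 ≤ j ∧ j < j + 1 + (xs.length : Int)) := by omega
      have h2 : j ≤ j ∧ j < j + ((x :: xs).length : Int) := by
        simp only [List.length_cons]; push_cast; omega
      rw [if_neg h1, if_pos h2, pvStep_getD]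
      simp [PySem.List.pyGetD, PySem.List.pyGet?, PySem.List.pyIdx?]
    · rw [pvStep_getD, if_neg hj]
      by_cases h : s + 1 ≤ j ∧ j < s + 1 + (xs.length : Int)
      · have h2 : s ≤ j ∧ j < s + ((x :: xs).length : Int) := by
          simp only [List.length_cons]; push_cast; omega
        rw [if_pos h, if_pos h2]
        have hget : PySem.List.pyGetD xs (j - (s+1)) "" = PySem.List.pyGetD (x :: xs) (j - s) "" := by
          have e1 : PySem.List.pyGetD xs (j - (s+1)) "" = xs[(j - (s+1)).toNat] :=
            PySem.List.pyGetD_eq_getElem xs "" (by omega) (by omega)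
          have e2 : PySem.List.pyGetD (x :: xs) (j - s) "" = (x :: xs)[(j - s).toNat] :=
            PySem.List.pyGetD_eq_getElem (x :: xs) "" (by omega) (by simp only [List.length_cons]; push_cast; omega)
          rw [e1, e2]
          have : (j - s).toNat = (j - (s+1)).toNat + 1 := by omega
          simp [this]
        rw [hget]
      · have h2 : ¬ (s ≤ j ∧ j < s + ((x :: xs).length : Int)) := by
          simp only [List.length_cons]; push_cast; omega
        rw [if_neg h, if_neg h2]

theorem pvInner_keys (l : List (Int × String)) (pc : PySem.Dict Int (PySem.Dict String Int)) :
    ((l.foldl pvStep pc)).keys = PySem.Set.update pc.keys (l.map (·.1)) := by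
  induction l generalizing pc with
  | nil => simp [PySem.Set.update]
  | cons x xs ih => rw [List.foldl_cons, ih, List.map_cons, PySem.Set.update_cons, pvStep_keys]

theorem pvOuter_getD (paths_dict : List (String × List String)) (pc : PySem.Dict Int (PySem.Dict String Int)) (j : Int) (hj : 0 ≤ j) :
    ((paths_dict.foldl (fun pc kv => (PySem.List.enumerate kv.2 0).foldl pvStep pc) pc)).getD j PySem.Dict.empty =
      (pvCol paths_dict j).foldl (fun c u => c.modify u 0 (· + 1)) (pc.getD j PySem.Dict.empty) := by
  induction paths_dict generalizing pc with
  | nil => simp [pvCol]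
  | cons kv rest ih =>
    rw [List.foldl_cons, ih, pvInner_getD]
    have hcol : pvCol (kv :: rest) j =
        (if j < (kv.2.length : Int) then [PySem.List.pyGetD kv.2 j ""] else []) ++ pvCol rest j := by
      by_cases h : j < (kv.2.length : Int)
      · simp [pvCol, PySem.List.len_eq, h]
      · simp [pvCol, PySem.List.len_eq, h]
    rw [hcol]
    split_ifs with h1 h2 h2
    · simp only [List.singleton_append, List.foldl_cons, Int.sub_zero]
    · exact absurd (by omega : j < (kv.2.length : Int)) h2
    · exact absurd ⟨hj, by omega⟩ h1
    · simp only [List.nil_append]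

theorem pvOuter_keys (paths_dict : List (String × List String)) (pc : PySem.Dict Int (PySem.Dict String Int)) :
    ((paths_dict.foldl (fun pc kv => (PySem.List.enumerate kv.2 0).foldl pvStep pc) pc)).keys =
      paths_dict.foldl (fun s kv => PySem.Set.update s (PySem.List.pyRange 0 (kv.2.length : Int) 1)) pc.keys := by
  induction paths_dict generalizing pc with
  | nil => rfl
  | cons kv rest ih =>
    rw [List.foldl_cons, List.foldl_cons, ih, pvInner_keys, PySem.List.map_fst_enumerate, zero_add]

theorem pvRange_update (a b : Int) (ha : 0 ≤ a) :
    PySem.Set.update (PySem.List.pyRange 0 a 1) (PySem.List.pyRange 0 b 1) = PySem.List.pyRange 0 (max a b) 1 := by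
  rw [PySem.Set.update_eq_append_filter,
    PySem.Set.ofList_eq_self_of_nodup _ (PySem.List.nodup_pyRange_one 0 b)]
  by_cases hab : b ≤ a
  · rw [List.filter_eq_nil_iff.mpr, List.append_nil, max_eq_left hab]
    intro y hy
    simp only [PySem.Set.contains_eq_listContains, List.contains_eq_mem, Bool.not_eq_true',
      decide_eq_false_iff_not, PySem.List.mem_pyRange_one] at hy ⊢
    omega
  · rw [not_le] at hab
    rw [PySem.List.pyRange_one_append 0 a b ha (le_of_lt hab), List.filter_append]
    rw [List.filter_eq_nil_iff.mpr, List.nil_append, List.filter_eq_self.mpr,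
      ← PySem.List.pyRange_one_append 0 a b ha (le_of_lt hab), max_eq_right (le_of_lt hab)]
    · intro y hy
      simp only [PySem.Set.contains_eq_listContains, List.contains_eq_mem, Bool.not_eq_true',
        decide_eq_false_iff_not, PySem.List.mem_pyRange_one] at hy ⊢
      omega
    · intro y hy
      simp only [PySem.Set.contains_eq_listContains, List.contains_eq_mem, Bool.not_eq_true',
        decide_eq_false_iff_not, PySem.List.mem_pyRange_one] at hy ⊢
      omega

theorem pvRangeFold (paths_dict : List (String × List String)) (a : Int) (ha : 0 ≤ a) :
    paths_dict.foldl (fun s kv => PySem.Set.update s (PySem.List.pyRange 0 (kv.2.length : Int) 1)) (PySem.List.pyRange 0 a 1) =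
      PySem.List.pyRange 0 (paths_dict.foldl (fun m kv => max m (PySem.List.len kv.2)) a) 1 := by
  induction paths_dict generalizing a with
  | nil => rfl
  | cons kv rest ih =>
    rw [List.foldl_cons, List.foldl_cons, pvRange_update _ _ ha, PySem.List.len_eq,
      ih _ (le_trans ha (le_max_left _ _))]

theorem pvMax?_foldl (xs : List Int) (m : Int) :
    PySem.List.max? (m :: xs) (fun y => y) = some (xs.foldl max m) := by
  induction xs generalizing m with
  | nil => rfl
  | cons x xs ih =>
    have step : PySem.List.max? (m :: x :: xs) (fun y => y)
        = PySem.List.max? (max m x :: xs) (fun y => y) := by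
      unfold PySem.List.max?
      simp only [List.foldl_cons]
      congr 1
      show (if m < x then some x else some m) = some (max m x)
      rcases lt_or_ge m x with h | h
      · rw [if_pos h, max_eq_right (le_of_lt h)]
      · rw [if_neg (not_lt.mpr h), max_eq_left h]
    rw [step, ih, List.foldl_cons]

theorem pvMaxD_nonneg (xs : List Int) (h : ∀ x ∈ xs, 0 ≤ x) :
    PySem.List.maxD xs (fun y => y) 0 = xs.foldl max 0 := by
  cases xs with
  | nil => rfl
  | cons x xs =>
    have hx : 0 ≤ x := h x (List.mem_cons_self)
    unfold PySem.List.maxD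
    rw [pvMax?_foldl, Option.getD_some, List.foldl_cons, max_eq_right hx]

theorem pvMaxD_eq_foldl (paths_dict : List (String × List String)) :
    PySem.List.maxD ((paths_dict.map (·.2)).map (fun p => PySem.List.len p)) (fun x => x) 0 =
      paths_dict.foldl (fun m kv => max m (PySem.List.len kv.2)) 0 := by
  rw [pvMaxD_nonneg _ (by
    intro x hx
    simp only [List.mem_map] at hx
    obtain ⟨p, _, rfl⟩ := hx
    rw [PySem.List.len_eq]; positivity)]
  rw [List.map_map, List.foldl_map]
  rfl

-- ===== VERDICT (by name: the statement is the Claim_ definition above) =====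
theorem upgrade_popularity_by_position_spec : Claim_equal_upgrade_popularity_by_position := by
  intro paths_dict _
  unfold Spec_upgrade_popularity_by_position upgrade_popularity_by_position upgrade_popularity_by_position_alt
  simp only []
  set F := paths_dict.foldl (fun pc kv => (PySem.List.enumerate kv.2 0).foldl pvStep pc)
      (PySem.Dict.empty : PySem.Dict Int (PySem.Dict String Int)) with hF
  set M := paths_dict.foldl (fun m kv => max m (PySem.List.len kv.2)) 0 with hM
  have hkeys : F.keys = PySem.List.pyRange 0 M 1 := by
    rw [hF, pvOuter_keys]
    have : (PySem.Dict.empty : PySem.Dict Int (PySem.Dict String Int)).keys = PySem.List.pyRange 0 0 1 := rfl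
    rw [this, pvRangeFold _ _ (le_refl 0), hM]
  have hnodup : F.keys.Nodup := by rw [hkeys]; exact PySem.List.nodup_pyRange_one 0 M
  have hitems : F.items = (PySem.List.pyRange 0 M 1).map
      (fun i => (i, PySem.Dict.counter (pvCol paths_dict i))) := by
    rw [PySem.Dict.items_eq_map_keys F hnodup PySem.Dict.empty, hkeys]
    apply List.map_congr_left
    intro i hi
    rw [PySem.List.mem_pyRange_one] at hi
    rw [hF, pvOuter_getD _ _ _ hi.1, PySem.Dict.getD_empty, PySem.Dict.counter_eq_foldl]
  rw [hitems, List.map_map, pvMaxD_eq_foldl, ← hM]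
  apply List.map_congr_left
  intro i _
  simp only [Function.comp_apply, pvCol]
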